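-- pv_equiv track=rewrite | github.com/eyal868/FinalQML | spectral_gap_analysis.py | adjacency_to_edges
-- ===== SOURCE A (Python) =====
-- from typing import List, Tuple
--
-- def adjacency_to_edges(adj_dict: dict) -> List[Tuple[int, int]]:
--     """
--     Convert adjacency dictionary to edge list (avoiding duplicates).
--
--     Args:
--         adj_dict: Dictionary mapping vertex -> list of neighbors (1-indexed)
--
--     Returns:
--         List of edges as (v1, v2) tuples (0-indexed), with v1 < v2
--     """
--     edges = []
--     seen = set()
--
--     for v, neighbors in adj_dict.items():
--         for n in neighbors:
--             edge = (min(v, n), max(v, n))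
--             if edge not in seen:
--                 seen.add(edge)
--                 edges.append((edge[0] - 1, edge[1] - 1))
--     return sorted(edges)
-- ===== SOURCE B (Python) =====
-- from typing import List, Tuple
--
-- def adjacency_to_edges(adj_dict: dict) -> List[Tuple[int, int]]:
--     """Sort-then-dedup: collect every (shifted) edge, sort, drop adjacent duplicates."""
--     flat = []
--     for v, neighbors in adj_dict.items():
--         for n in neighbors:
--             flat.append((min(v, n) - 1, max(v, n) - 1))
--     flat.sort()
--     out = []
--     for e in flat:
--         if not out or out[-1] != e:
--             out.append(e)
--     return out
-- ===== Notes on version B (the rewrite author's own statement) =====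
-- stated objective: alternative
-- what changed: Replaces A's hash-set membership filter during collection by collecting all edges with duplicates, sorting the flat list, and removing adjacent duplicates in a single post-sort pass.
import Mathlib
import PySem

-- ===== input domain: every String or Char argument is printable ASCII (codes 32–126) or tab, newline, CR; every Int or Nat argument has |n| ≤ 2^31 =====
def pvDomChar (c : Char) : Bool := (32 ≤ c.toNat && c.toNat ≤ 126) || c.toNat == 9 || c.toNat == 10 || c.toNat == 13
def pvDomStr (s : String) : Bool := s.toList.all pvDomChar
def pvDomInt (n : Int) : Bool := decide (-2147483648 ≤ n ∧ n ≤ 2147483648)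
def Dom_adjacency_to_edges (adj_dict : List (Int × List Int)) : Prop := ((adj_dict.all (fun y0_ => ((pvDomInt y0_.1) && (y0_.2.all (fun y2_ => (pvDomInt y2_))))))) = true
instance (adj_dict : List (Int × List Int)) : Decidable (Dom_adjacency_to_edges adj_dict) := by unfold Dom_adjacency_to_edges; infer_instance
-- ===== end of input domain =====

-- B replaces A's hash-set duplicate filter by sort-then-adjacent-dedup (same asymptotic cost; a different algorithm).

-- ===== PORT A =====
-- body of A's inner loop: edge = (min(v,n), max(v,n)); if edge not in seen: seen.add(edge); edges.append((edge[0]-1, edge[1]-1))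
def pvAStep (v : Int) (st : List (Int × Int) × PySem.Set (Int × Int)) (n : Int) :
    List (Int × Int) × PySem.Set (Int × Int) :=
  let edge := (min v n, max v n)
  if !(PySem.Set.contains st.2 edge) then
    (st.1 ++ [(edge.1 - 1, edge.2 - 1)], PySem.Set.add st.2 edge)
  else st

def adjacency_to_edges (adj_dict : List (Int × List Int)) : List (Int × Int) :=
  let st := (PySem.Dict.ofList adj_dict).items.foldl
    (fun st vn => vn.2.foldl (pvAStep vn.1) st) ([], PySem.Set.empty)
  PySem.List.sorted2 st.1 Prod.fst Prod.snd

-- ===== PORT B =====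
-- body of B's dedup loop: if not out or out[-1] != e: out.append(e)
def pvDStep (out : List (Int × Int)) (e : Int × Int) : List (Int × Int) :=
  if out = [] ∨ out.getLast? ≠ some e then out ++ [e] else out

def adjacency_to_edges_alt (adj_dict : List (Int × List Int)) : List (Int × Int) :=
  let flat := (PySem.Dict.ofList adj_dict).items.foldl
    (fun acc vn => vn.2.foldl (fun acc n => acc ++ [(min vn.1 n - 1, max vn.1 n - 1)]) acc) []
  let sortedFlat := PySem.List.sorted2 flat Prod.fst Prod.snd
  sortedFlat.foldl pvDStep []

-- ===== PRECONDITION & SPEC =====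
def Spec_adjacency_to_edges (adj_dict : List (Int × List Int)) (out : List (Int × Int)) : Prop := out = adjacency_to_edges_alt adj_dict
instance (adj_dict : List (Int × List Int)) (out : List (Int × Int)) : Decidable (Spec_adjacency_to_edges adj_dict out) := by unfold Spec_adjacency_to_edges; infer_instance

-- ===== CLAIM (what is proved, stated in full; the proofs are below) =====
def Claim_equal_adjacency_to_edges : Prop := ∀ (adj_dict : List (Int × List Int)), Dom_adjacency_to_edges adj_dict → Spec_adjacency_to_edges adj_dict (adjacency_to_edges adj_dict)

-- ===== LEMMAS AND PROOFS =====

-- The shift (v1, v2) ↦ (v1 - 1, v2 - 1) applied to each deduplicated edge.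
def pvShift (p : Int × Int) : Int × Int := (p.1 - 1, p.2 - 1)

-- Python's lexicographic tuple order on int pairs (what sorted() uses here).
def pvLexLt (a b : Int × Int) : Prop := a.1 < b.1 ∨ (a.1 = b.1 ∧ a.2 < b.2)
def pvLexLe (a b : Int × Int) : Prop := ¬ pvLexLt b a

-- the boolean comparator PySem.List.sorted2 builds from the two projections
def pvBefore (a b : Int × Int) : Bool :=
  decide (a.1 < b.1) || (!decide (b.1 < a.1) && decide (a.2 < b.2))

lemma pvBefore_iff (a b : Int × Int) : pvBefore a b = true ↔ pvLexLt a b := by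
  simp [pvBefore, pvLexLt]; omega

lemma pvLexLt_asymm {a b : Int × Int} (h : pvLexLt a b) : pvLexLe a b := by
  simp [pvLexLt, pvLexLe] at *; omega

lemma pvLexLe_of_not_lt {a b : Int × Int} (h : ¬ pvLexLt a b) : pvLexLe b a := h

lemma pvLexLe_trans {a b c : Int × Int} (h1 : pvLexLe a b) (h2 : pvLexLe b c) : pvLexLe a c := by
  simp [pvLexLt, pvLexLe] at *; omega

lemma pvLex_antisymm {a b : Int × Int} (h1 : pvLexLe a b) (h2 : pvLexLe b a) : a = b := by
  obtain ⟨a1, a2⟩ := a; obtain ⟨b1, b2⟩ := b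
  simp [pvLexLe, pvLexLt, Prod.mk.injEq] at *
  omega

lemma pvLexLt_ne {a b : Int × Int} (h : pvLexLt a b) : a ≠ b := by
  obtain ⟨a1, a2⟩ := a; obtain ⟨b1, b2⟩ := b
  simp [pvLexLt, Prod.mk.injEq] at *; omega

lemma pvLexLt_of_le_of_ne {a b : Int × Int} (h : pvLexLe a b) (hne : a ≠ b) : pvLexLt a b := by
  by_contra hn
  exact hne (pvLex_antisymm h hn)

lemma pvShift_inj : Function.Injective pvShift := by
  intro a b h
  obtain ⟨a1, a2⟩ := a; obtain ⟨b1, b2⟩ := b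
  simp [pvShift, Prod.mk.injEq] at *; omega

-- sorted2 with the two projections is the insertBy fold with pvBefore
lemma pvSorted2_eq (l : List (Int × Int)) :
    PySem.List.sorted2 l Prod.fst Prod.snd =
    l.foldl (fun acc x => PySem.List.insertBy pvBefore x acc) [] := rfl

lemma pvInsertBy_nil (x : Int × Int) : PySem.List.insertBy pvBefore x [] = [x] := rfl

lemma pvInsertBy_cons (x y : Int × Int) (ys : List (Int × Int)) :
    PySem.List.insertBy pvBefore x (y :: ys) =
    if pvBefore x y = true then x :: y :: ys else y :: PySem.List.insertBy pvBefore x ys := rfl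

lemma pvInsertBy_pairwise (x : Int × Int) :
    ∀ ys : List (Int × Int), ys.Pairwise pvLexLe →
    (PySem.List.insertBy pvBefore x ys).Pairwise pvLexLe := by
  intro ys
  induction ys with
  | nil => intro _; rw [pvInsertBy_nil]; exact List.pairwise_singleton _ _
  | cons y ys ih =>
    intro h
    rw [List.pairwise_cons] at h
    obtain ⟨hy, hys⟩ := h
    by_cases hb : pvBefore x y = true
    · rw [pvInsertBy_cons, if_pos hb]
      have hxy : pvLexLt x y := (pvBefore_iff x y).mp hb
      refine List.Pairwise.cons ?_ (List.Pairwise.cons hy hys)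
      intro z hz
      rcases List.mem_cons.mp hz with rfl | hz'
      · exact pvLexLt_asymm hxy
      · exact pvLexLe_trans (pvLexLt_asymm hxy) (hy z hz')
    · rw [pvInsertBy_cons, if_neg hb]
      refine List.Pairwise.cons (fun z hz => ?_) (ih hys)
      rcases (PySem.List.mem_insertBy pvBefore x z ys).mp hz with hzx | hzys
      · rw [hzx]
        exact pvLexLe_of_not_lt (fun hlt => hb ((pvBefore_iff x y).mpr hlt))
      · exact hy z hzys

lemma pvFoldl_insertBy_pairwise :
    ∀ (l acc : List (Int × Int)), acc.Pairwise pvLexLe →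
    (l.foldl (fun acc x => PySem.List.insertBy pvBefore x acc) acc).Pairwise pvLexLe := by
  intro l
  induction l with
  | nil => intro acc h; simpa using h
  | cons x l ih =>
    intro acc h
    exact ih _ (pvInsertBy_pairwise x acc h)

lemma pvSorted2_pairwise (l : List (Int × Int)) :
    (PySem.List.sorted2 l Prod.fst Prod.snd).Pairwise pvLexLe := by
  rw [pvSorted2_eq]
  exact pvFoldl_insertBy_pairwise l [] (by simp)

-- ===== A-side invariant =====
lemma pvA_inner (v : Int) :
    ∀ (ns : List Int) (ed : List (Int × Int)) (seen : PySem.Set (Int × Int)),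
    seen.Nodup → ed = seen.map pvShift →
    ((ns.foldl (pvAStep v) (ed, seen)).2.Nodup ∧
     (ns.foldl (pvAStep v) (ed, seen)).1 = (ns.foldl (pvAStep v) (ed, seen)).2.map pvShift ∧
     (∀ x, x ∈ (ns.foldl (pvAStep v) (ed, seen)).2 ↔ x ∈ seen ∨ ∃ n ∈ ns, x = (min v n, max v n))) := by
  intro ns
  induction ns with
  | nil => intro ed seen hnd hmap; exact ⟨hnd, hmap, by simp⟩
  | cons n ns ih =>
    intro ed seen hnd hmap
    by_cases hc : (min v n, max v n) ∈ seen
    · have hstep : pvAStep v (ed, seen) n = (ed, seen) := by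
        simp [pvAStep, hc]
      simp only [List.foldl_cons, hstep]
      obtain ⟨h1, h2, h3⟩ := ih ed seen hnd hmap
      refine ⟨h1, h2, fun x => ?_⟩
      rw [h3 x]
      simp only [List.mem_cons]
      constructor
      · rintro (hx | ⟨m, hm, rfl⟩)
        · exact Or.inl hx
        · exact Or.inr ⟨m, Or.inr hm, rfl⟩
      · rintro (hx | ⟨m, (rfl | hm), rfl⟩)
        · exact Or.inl hx
        · exact Or.inl hc
        · exact Or.inr ⟨m, hm, rfl⟩
    · have hstep : pvAStep v (ed, seen) n =
          (ed ++ [pvShift (min v n, max v n)], seen ++ [(min v n, max v n)]) := by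
        simp [pvAStep, hc, pvShift]
      simp only [List.foldl_cons, hstep]
      have hnd' : (seen ++ [(min v n, max v n)]).Nodup := by
        rw [← PySem.Set.add_of_not_mem hc]
        exact PySem.Set.nodup_add seen _ hnd
      have hmap' : ed ++ [pvShift (min v n, max v n)] =
          (seen ++ [(min v n, max v n)]).map pvShift := by
        simp [hmap]
      obtain ⟨h1, h2, h3⟩ := ih _ _ hnd' hmap'
      refine ⟨h1, h2, fun x => ?_⟩
      rw [h3 x]
      simp only [List.mem_append, List.mem_cons, List.not_mem_nil, or_false]
      constructor
      · rintro ((hx | rfl) | ⟨m, hm, rfl⟩)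
        · exact Or.inl hx
        · exact Or.inr ⟨n, Or.inl rfl, rfl⟩
        · exact Or.inr ⟨m, Or.inr hm, rfl⟩
      · rintro (hx | ⟨m, (rfl | hm), rfl⟩)
        · exact Or.inl (Or.inl hx)
        · exact Or.inl (Or.inr rfl)
        · exact Or.inr ⟨m, hm, rfl⟩

lemma pvA_outer :
    ∀ (l : List (Int × List Int)) (ed : List (Int × Int)) (seen : PySem.Set (Int × Int)),
    seen.Nodup → ed = seen.map pvShift →
    ((l.foldl (fun st vn => vn.2.foldl (pvAStep vn.1) st) (ed, seen)).2.Nodup ∧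
     (l.foldl (fun st vn => vn.2.foldl (pvAStep vn.1) st) (ed, seen)).1 =
       (l.foldl (fun st vn => vn.2.foldl (pvAStep vn.1) st) (ed, seen)).2.map pvShift ∧
     (∀ x, x ∈ (l.foldl (fun st vn => vn.2.foldl (pvAStep vn.1) st) (ed, seen)).2 ↔
       x ∈ seen ∨ ∃ p ∈ l, ∃ n ∈ p.2, x = (min p.1 n, max p.1 n))) := by
  intro l
  induction l with
  | nil => intro ed seen hnd hmap; exact ⟨hnd, hmap, by simp⟩
  | cons p l ih =>
    intro ed seen hnd hmap
    simp only [List.foldl_cons]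
    obtain ⟨h1, h2, h3⟩ := pvA_inner p.1 p.2 ed seen hnd hmap
    obtain ⟨g1, g2, g3⟩ := ih _ _ h1 h2
    refine ⟨g1, g2, fun x => ?_⟩
    rw [g3 x, h3 x]
    constructor
    · rintro ((hx | ⟨m, hm, rfl⟩) | ⟨q, hq, m, hm, rfl⟩)
      · exact Or.inl hx
      · exact Or.inr ⟨p, List.mem_cons_self .., m, hm, rfl⟩
      · exact Or.inr ⟨q, List.mem_cons_of_mem _ hq, m, hm, rfl⟩
    · rintro (hx | ⟨q, hq, m, hm, rfl⟩)
      · exact Or.inl (Or.inl hx)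
      · rcases List.mem_cons.mp hq with rfl | hq'
        · exact Or.inl (Or.inr ⟨m, hm, rfl⟩)
        · exact Or.inr ⟨q, hq', m, hm, rfl⟩

-- ===== B-side: the flat collection =====
def pvFlat (l : List (Int × List Int)) : List (Int × Int) :=
  l.flatMap (fun vn => vn.2.map (fun n => (min vn.1 n - 1, max vn.1 n - 1)))

lemma pvB_flat (l : List (Int × List Int)) :
    l.foldl (fun acc vn => vn.2.foldl (fun acc n => acc ++ [(min vn.1 n - 1, max vn.1 n - 1)]) acc) [] =
    pvFlat l := by
  simp only [PySem.List.foldl_append_singleton_eq_map]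
  rw [PySem.List.foldl_append_eq_flatMap]
  simp [pvFlat]

lemma pvFlat_mem (l : List (Int × List Int)) (x : Int × Int) :
    x ∈ pvFlat l ↔ ∃ p ∈ l, ∃ n ∈ p.2, x = pvShift (min p.1 n, max p.1 n) := by
  simp only [pvFlat, List.mem_flatMap, List.mem_map]
  constructor
  · rintro ⟨p, hp, m, hm, rfl⟩; exact ⟨p, hp, m, hm, rfl⟩
  · rintro ⟨p, hp, m, hm, rfl⟩; exact ⟨p, hp, m, hm, rfl⟩

-- every element of a pvLexLt-pairwise list is ≤ its last element
lemma pvLe_getLast {acc : List (Int × Int)} {z a : Int × Int}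
    (hp : acc.Pairwise pvLexLt) (hz : acc.getLast? = some z) (ha : a ∈ acc) : pvLexLe a z := by
  have hne : acc ≠ [] := by rintro rfl; simp at hz
  have hlast : acc.getLast hne = z := by
    rw [List.getLast?_eq_some_getLast hne, Option.some.injEq] at hz
    exact hz
  have hsplit := List.dropLast_append_getLast hne
  rcases (by rw [← hsplit] at ha; simpa using ha : a ∈ acc.dropLast ∨ a = acc.getLast hne) with hd | rfl
  · have := (by rw [← hsplit] at hp; exact hp : (acc.dropLast ++ [acc.getLast hne]).Pairwise pvLexLt)
    rw [List.pairwise_append] at this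
    have := this.2.2 a hd (acc.getLast hne) (by simp)
    rw [hlast] at this
    exact pvLexLt_asymm this
  · rw [hlast]
    intro h
    exact pvLexLt_ne h rfl

-- ===== the dedup pass =====
lemma pvDedup_spec :
    ∀ (l acc : List (Int × Int)), acc.Pairwise pvLexLt → l.Pairwise pvLexLe →
    (∀ a ∈ acc, ∀ b ∈ l, pvLexLe a b) →
    ((l.foldl pvDStep acc).Pairwise pvLexLt ∧
     ∀ x, x ∈ l.foldl pvDStep acc ↔ x ∈ acc ∨ x ∈ l) := by
  intro l
  induction l with
  | nil => intro acc h1 _ _; exact ⟨h1, by simp⟩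
  | cons e l ih =>
    intro acc h1 h2 h3
    rw [List.pairwise_cons] at h2
    obtain ⟨he, hl⟩ := h2
    by_cases hc : acc = [] ∨ acc.getLast? ≠ some e
    · have hstep : pvDStep acc e = acc ++ [e] := by simp [pvDStep, hc]
      simp only [List.foldl_cons, hstep]
      have hacc' : (acc ++ [e]).Pairwise pvLexLt := by
        rw [List.pairwise_append]
        refine ⟨h1, by simp, fun a ha b hb => ?_⟩
        rw [List.mem_singleton] at hb
        rw [hb]
        have hle : pvLexLe a e := h3 a ha e (List.mem_cons_self ..)
        refine pvLexLt_of_le_of_ne hle (fun heq => ?_)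
        have hae : e ∈ acc := heq ▸ ha
        rcases hc with hnil | hlast
        · rw [hnil] at hae; simp at hae
        · have hne : acc ≠ [] := by rintro rfl; simp at hae
          have hz : acc.getLast? = some (acc.getLast hne) := List.getLast?_eq_some_getLast hne
          have hz1 : pvLexLe e (acc.getLast hne) := pvLe_getLast h1 hz hae
          have hz2 : pvLexLe (acc.getLast hne) e :=
            h3 _ (List.getLast_mem hne) e (List.mem_cons_self ..)
          have heq2 : e = acc.getLast hne := pvLex_antisymm hz1 hz2
          exact hlast (by rw [heq2]; exact hz)
      have h3' : ∀ a ∈ acc ++ [e], ∀ b ∈ l, pvLexLe a b := by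
        intro a ha b hb
        rcases List.mem_append.mp ha with ha' | ha'
        · exact h3 a ha' b (List.mem_cons_of_mem _ hb)
        · rw [List.mem_singleton] at ha'; subst ha'; exact he b hb
      obtain ⟨g1, g2⟩ := ih (acc ++ [e]) hacc' hl h3'
      refine ⟨g1, fun x => ?_⟩
      rw [g2 x]
      simp only [List.mem_append, List.mem_cons]
      tauto
    · have hstep : pvDStep acc e = acc := by simp [pvDStep, hc]
      simp only [List.foldl_cons, hstep]
      have hne : acc ≠ [] := fun h => hc (Or.inl h)
      have hlast : acc.getLast? = some e := by
        by_contra h; exact hc (Or.inr h)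
      have hmem : e ∈ acc := by
        rw [List.getLast?_eq_some_getLast hne, Option.some.injEq] at hlast
        rw [← hlast]; exact List.getLast_mem hne
      have h3' : ∀ a ∈ acc, ∀ b ∈ l, pvLexLe a b :=
        fun a ha b hb => h3 a ha b (List.mem_cons_of_mem _ hb)
      obtain ⟨g1, g2⟩ := ih acc h1 hl h3'
      refine ⟨g1, fun x => ?_⟩
      rw [g2 x]
      simp only [List.mem_cons]
      constructor
      · rintro (hx | hx)
        · exact Or.inl hx
        · exact Or.inr (Or.inr hx)
      · rintro (hx | rfl | hx)
        · exact Or.inl hx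
        · exact Or.inl hmem
        · exact Or.inr hx

-- ===== VERDICT (by name: the statement is the Claim_ definition above) =====
theorem adjacency_to_edges_spec : Claim_equal_adjacency_to_edges := by
  intro adj_dict _
  unfold Spec_adjacency_to_edges adjacency_to_edges adjacency_to_edges_alt
  simp only [pvB_flat]
  set l := (PySem.Dict.ofList adj_dict).items with hl
  obtain ⟨hS_nd, hS_map, hS_mem⟩ := pvA_outer l [] PySem.Set.empty (by simp [PySem.Set.empty]) (by simp [PySem.Set.empty])
  set st := l.foldl (fun st vn => vn.2.foldl (pvAStep vn.1) st) ([], PySem.Set.empty) with hst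
  -- B's side
  have hs_le : (PySem.List.sorted2 (pvFlat l) Prod.fst Prod.snd).Pairwise pvLexLe :=
    pvSorted2_pairwise _
  obtain ⟨hB_lt, hB_mem⟩ := pvDedup_spec (PySem.List.sorted2 (pvFlat l) Prod.fst Prod.snd) []
    (by simp) hs_le (by simp)
  set ys := (PySem.List.sorted2 (pvFlat l) Prod.fst Prod.snd).foldl pvDStep [] with hys
  -- memberships agree
  have hmem_eq : ∀ x, x ∈ st.1 ↔ x ∈ ys := by
    intro x
    rw [hB_mem x]
    simp only [List.mem_nil_iff, false_or]
    rw [(PySem.List.sorted2_perm (pvFlat l) Prod.fst Prod.snd false).mem_iff]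
    rw [pvFlat_mem]
    rw [hS_map]
    simp only [List.mem_map]
    constructor
    · rintro ⟨e, he, rfl⟩
      rcases (hS_mem e).mp he with h | ⟨p, hp, n, hn, rfl⟩
      · simp [PySem.Set.empty] at h
      · exact ⟨p, hp, n, hn, rfl⟩
    · rintro ⟨p, hp, n, hn, rfl⟩
      exact ⟨(min p.1 n, max p.1 n), (hS_mem _).mpr (Or.inr ⟨p, hp, n, hn, rfl⟩), rfl⟩
  -- both nodup
  have hA_nd : st.1.Nodup := by rw [hS_map]; exact hS_nd.map pvShift_inj
  have hB_nd : ys.Nodup := hB_lt.imp (fun h => pvLexLt_ne h)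
  -- A's sorted output
  have hA_le : (PySem.List.sorted2 st.1 Prod.fst Prod.snd).Pairwise pvLexLe := pvSorted2_pairwise _
  have hA_perm : (PySem.List.sorted2 st.1 Prod.fst Prod.snd).Perm st.1 :=
    PySem.List.sorted2_perm st.1 Prod.fst Prod.snd false
  have hperm : (PySem.List.sorted2 st.1 Prod.fst Prod.snd).Perm ys :=
    hA_perm.trans ((List.perm_ext_iff_of_nodup hA_nd hB_nd).mpr hmem_eq)
  have hB_le : ys.Pairwise pvLexLe := hB_lt.imp (fun h => pvLexLt_asymm h)
  exact List.Perm.eq_of_pairwise (fun a b _ _ h1 h2 => pvLex_antisymm h1 h2) hA_le hB_le hperm
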